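-- pv_equiv track=rewrite | github.com/NahuelDumo/ModuloGeneradorPresupuesto- | models/funciones.py | cadena_reformada
-- ===== SOURCE A (Python) =====
-- def cadena_reformada(nombre):
--     # Separar en palabras
--     palabras = nombre.split()
--
--     # Calcular índice del medio
--     mitad = (len(palabras) // 2)+1
--
--     # Insertar <br> en el medio
--     palabras.insert(mitad, "<br>")
--
--     # Unir las partes sin agregar espacio alrededor del <br>
--     resultado = ""
--     for i, palabra in enumerate(palabras):
--         if palabra == "<br>":
--             resultado += palabra  # sin espacio
--         elif i > 0 and palabras[i - 1] != "<br>":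
--             resultado += " " + palabra
--         else:
--             resultado += palabra
--
--     return resultado
-- ===== SOURCE B (Python) =====
-- def cadena_reformada(nombre):
--     # Split into words and slice around the midpoint; render as groups of
--     # words (separated by "<br>" tokens) joined by spaces, then glue the
--     # groups with "<br>" -- no per-element index bookkeeping.
--     palabras = nombre.split()
--     mitad = len(palabras) // 2 + 1
--     tokens = palabras[:mitad] + ["<br>"] + palabras[mitad:]
--     grupos = []
--     actual = []
--     for t in tokens:
--         if t == "<br>":
--             grupos.append(" ".join(actual))
--             actual = []
--         else:
--             actual.append(t)
--     grupos.append(" ".join(actual))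
--     return "<br>".join(grupos)
-- ===== Notes on version B (the rewrite author's own statement) =====
-- stated objective: alternative
-- what changed: Replaces A's in-place insert plus indexed enumerate loop that consults palabras[i-1] to suppress spaces around '<br>' with a grouping pass: the token list (built by slicing around the midpoint) is split into groups at '<br>' tokens, each group is space-joined and the groups are '<br>'-joined.
import Mathlib
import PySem

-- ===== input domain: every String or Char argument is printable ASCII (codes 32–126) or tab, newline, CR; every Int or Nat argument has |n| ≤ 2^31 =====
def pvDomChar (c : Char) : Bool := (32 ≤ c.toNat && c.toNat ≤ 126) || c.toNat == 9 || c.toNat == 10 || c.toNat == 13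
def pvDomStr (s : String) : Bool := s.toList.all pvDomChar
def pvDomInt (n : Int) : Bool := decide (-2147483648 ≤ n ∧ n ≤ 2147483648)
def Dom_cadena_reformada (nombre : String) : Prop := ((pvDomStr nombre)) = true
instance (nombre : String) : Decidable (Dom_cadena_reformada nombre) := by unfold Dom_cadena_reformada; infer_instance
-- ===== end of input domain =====

-- B re-expresses A's indexed join-with-<br>-suppression loop as: split into groups
-- of words at the "<br>" tokens, space-join each group, "<br>"-join the groups
-- (objective: alternative decomposition, same cost).

-- ===== PORT A =====
-- the body of A's 'for i, palabra in enumerate(palabras)' loop; 'palabras[i-1]' is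
-- accessed only under the guard i > 0, where it is always in range, so '.getD ""' is exact
def cadenaLoop (full : List String) (resultado : String) (p : Int × String) : String :=
  if p.2 = "<br>" then resultado ++ p.2
  else if 0 < p.1 ∧ (PySem.List.pyGet? full (p.1 - 1)).getD "" ≠ "<br>" then
    resultado ++ " " ++ p.2
  else resultado ++ p.2

def cadena_reformada (nombre : String) : String :=
  let palabras := PySem.Str.split₀ nombre
  let mitad : Int := PySem.Int.floordiv (palabras.length : Int) 2 + 1
  let palabras2 := PySem.List.insert palabras mitad "<br>"
  (PySem.List.enumerate palabras2).foldl (cadenaLoop palabras2) ""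

-- ===== PORT B =====
-- one step of B's grouping loop: close the current group on "<br>", else extend it
def altStep (st : List String × List String) (t : String) : List String × List String :=
  if t = "<br>" then (st.1 ++ [PySem.Str.join " " st.2], [])
  else (st.1, st.2 ++ [t])

def cadena_reformada_alt (nombre : String) : String :=
  let palabras := PySem.Str.split₀ nombre
  let mitad : Int := PySem.Int.floordiv (palabras.length : Int) 2 + 1
  let tokens := PySem.List.slice palabras none (some mitad) ++ ["<br>"]
      ++ PySem.List.slice palabras (some mitad) none
  let fin := tokens.foldl altStep ([], [])
  PySem.Str.join "<br>" (fin.1 ++ [PySem.Str.join " " fin.2])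

-- ===== PRECONDITION & SPEC =====
def Spec_cadena_reformada (nombre : String) (out : String) : Prop := out = cadena_reformada_alt nombre
instance (nombre : String) (out : String) : Decidable (Spec_cadena_reformada nombre out) := by unfold Spec_cadena_reformada; infer_instance

-- ===== CLAIM (what is proved, stated in full; the proofs are below) =====
def Claim_equal_cadena_reformada : Prop := ∀ (nombre : String), Dom_cadena_reformada nombre → Spec_cadena_reformada nombre (cadena_reformada nombre)

-- ===== LEMMAS AND PROOFS =====

-- the common normal form: the text contributed by each token given whether the previous
-- position was fresh (start of output or right after a "<br>" token)
def qpiece (fresh : Bool) (c : String) : String :=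
  if c = "<br>" then c else if fresh then c else " " ++ c

def qrest : Bool → List String → String
  | _, [] => ""
  | fresh, c :: cs => qpiece fresh c ++ qrest (decide (c = "<br>")) cs

-- String-level join facts (derived from the PySem.Chars lemmas through toList)
theorem joinS_nil (sep : String) : PySem.Str.join sep [] = "" := by
  apply String.toList_inj.mp
  simp [PySem.Str.toList_join, PySem.Chars.join_nil]

theorem joinS_singleton (sep p : String) : PySem.Str.join sep [p] = p := by
  apply String.toList_inj.mp
  simp [PySem.Str.toList_join, PySem.Chars.join_singleton]

theorem joinS_cons_cons (sep p q : String) (rest : List String) :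
    PySem.Str.join sep (p :: q :: rest) = p ++ sep ++ PySem.Str.join sep (q :: rest) := by
  apply String.toList_inj.mp
  simp [PySem.Str.toList_join, PySem.Chars.join_cons_cons]

theorem joinS_append_one (sep : String) (xs : List String) (c : String) :
    PySem.Str.join sep (xs ++ [c])
      = PySem.Str.join sep xs ++ (if xs.isEmpty then c else sep ++ c) := by
  induction xs with
  | nil => simp [joinS_singleton, joinS_nil, String.empty_append]
  | cons x rest ih =>
    cases rest with
    | nil =>
      simp [joinS_cons_cons, joinS_singleton, String.append_assoc]
    | cons y ys =>
      have h1 : (x :: y :: ys) ++ [c] = x :: y :: (ys ++ [c]) := by simp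
      rw [h1, joinS_cons_cons]
      have h2 : (y :: ys) ++ [c] = y :: (ys ++ [c]) := by simp
      rw [← h2, ih]
      simp [joinS_cons_cons, String.append_assoc]

theorem joinS_last_absorb (sep : String) (gs : List String) (y t : String) :
    PySem.Str.join sep (gs ++ [y ++ t]) = PySem.Str.join sep (gs ++ [y]) ++ t := by
  induction gs with
  | nil => simp [joinS_singleton]
  | cons g rest ih =>
    cases rest with
    | nil =>
      simp [joinS_cons_cons, joinS_singleton, String.append_assoc]
    | cons h hs =>
      have h1 : ∀ (z : String), (g :: h :: hs) ++ [z] = g :: ((h :: hs) ++ [z]) := by simp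
      rw [h1, h1]
      have h2 : ∀ (z : String), (h :: hs) ++ [z] = h :: (hs ++ [z]) := by simp
      rw [h2, h2, joinS_cons_cons, joinS_cons_cons, ← h2, ← h2, ih]
      simp [String.append_assoc]

-- A's loop, run from any position past a known previous token, produces qrest
theorem loopA_eq (L₂ : List String) (L₁ : List String) (prev acc : String) :
    (PySem.List.enumerate L₂ ((L₁.length : Int) + 1)).foldl
        (cadenaLoop (L₁ ++ prev :: L₂)) acc
      = acc ++ qrest (decide (prev = "<br>")) L₂ := by
  induction L₂ generalizing L₁ prev acc with
  | nil => simp [PySem.List.enumerate, qrest]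
  | cons c cs ih =>
    rw [PySem.List.enumerate_cons, List.foldl_cons]
    have hfull : L₁ ++ prev :: c :: cs = (L₁ ++ [prev]) ++ c :: cs := by simp
    have hlen : ((L₁.length : Int) + 1) + 1 = ((L₁ ++ [prev]).length : Int) + 1 := by
      simp
    rw [hfull, hlen, ih]
    -- compute the first step
    have hstep : cadenaLoop ((L₁ ++ [prev]) ++ c :: cs) acc ((L₁.length : Int) + 1, c)
        = acc ++ qpiece (decide (prev = "<br>")) c := by
      by_cases hc : c = "<br>"
      · simp [cadenaLoop, qpiece, hc]
      · by_cases hp : prev = "<br>"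
        · simp [cadenaLoop, qpiece, hc, hp]
        · have : (0:Int) < (L₁.length : Int) + 1 := by positivity
          simp [cadenaLoop, qpiece, hc, hp, this, String.append_assoc]
    rw [hstep, qrest]
    simp [String.append_assoc]

theorem A_eq_qrest (L : List String) :
    (PySem.List.enumerate L).foldl (cadenaLoop L) "" = qrest true L := by
  cases L with
  | nil => simp [PySem.List.enumerate, qrest]
  | cons x xs =>
    rw [show PySem.List.enumerate (x :: xs) = PySem.List.enumerate (x :: xs) 0 from rfl,
      PySem.List.enumerate_cons, List.foldl_cons]
    simp only [zero_add]
    have hstep : cadenaLoop (x :: xs) "" ((0 : Int), x) = x := by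
      by_cases hx : x = "<br>" <;> simp [cadenaLoop, hx, String.empty_append]
    rw [hstep]
    have := loopA_eq xs [] x x
    simp only [List.length_nil, Nat.cast_zero, zero_add, List.nil_append] at this
    rw [this, qrest]
    by_cases hx : x = "<br>" <;> simp [qpiece, hx]

-- B's grouping fold, finished off by the double join, also produces qrest
def altFin (st : List String × List String) : String :=
  PySem.Str.join "<br>" (st.1 ++ [PySem.Str.join " " st.2])

theorem foldB_eq (L : List String) (gs cur : List String) :
    altFin (L.foldl altStep (gs, cur)) = altFin (gs, cur) ++ qrest cur.isEmpty L := by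
  induction L generalizing gs cur with
  | nil => simp [qrest]
  | cons c cs ih =>
    rw [List.foldl_cons]
    by_cases hc : c = "<br>"
    · rw [show altStep (gs, cur) c = (gs ++ [PySem.Str.join " " cur], []) by
        simp [altStep, hc]]
      rw [ih]
      have hfin : altFin (gs ++ [PySem.Str.join " " cur], ([] : List String))
          = altFin (gs, cur) ++ "<br>" := by
        show PySem.Str.join "<br>" ((gs ++ [PySem.Str.join " " cur]) ++ [PySem.Str.join " " []])
            = _
        rw [joinS_nil, joinS_append_one]
        simp [altFin, String.append_empty]
      rw [hfin, qrest]
      simp [qpiece, hc, String.append_assoc]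
    · rw [show altStep (gs, cur) c = (gs, cur ++ [c]) by simp [altStep, hc]]
      rw [ih]
      have hne : (cur ++ [c]).isEmpty = false := by simp
      have hfin : altFin (gs, cur ++ [c]) = altFin (gs, cur) ++ qpiece cur.isEmpty c := by
        show PySem.Str.join "<br>" (gs ++ [PySem.Str.join " " (cur ++ [c])]) = _
        have hinner := joinS_append_one " " cur c
        rw [hinner, joinS_last_absorb]
        simp [altFin, qpiece, hc]
      rw [hne, hfin, qrest]
      simp [String.append_assoc, hc]

theorem B_eq_qrest (L : List String) :
    altFin (L.foldl altStep ([], [])) = qrest true L := by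
  rw [foldB_eq]
  have : altFin (([] : List String), ([] : List String)) = "" := by
    show PySem.Str.join "<br>" ([] ++ [PySem.Str.join " " []]) = ""
    rw [joinS_nil]
    simp [joinS_singleton]
  rw [this, String.empty_append]
  rfl

-- ===== VERDICT (by name: the statement is the Claim_ definition above) =====
theorem cadena_reformada_spec : Claim_equal_cadena_reformada := by
  intro nombre _
  unfold Spec_cadena_reformada cadena_reformada cadena_reformada_alt
  cases hps : PySem.Str.split₀ nombre with
  | nil => decide
  | cons w ws =>
    set ps := w :: ws with hps'
    have hlen : 1 ≤ ps.length := by simp [hps']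
    have hm : ps.length / 2 + 1 ≤ ps.length := by omega
    have hcast : PySem.Int.floordiv ((ps.length : Nat) : Int) 2 + 1
        = ((ps.length / 2 + 1 : Nat) : Int) := by
      rw [show ((2:Int) = ((2:Nat):Int)) from rfl, PySem.Int.floordiv_natCast]
      push_cast; ring
    simp only [hcast]
    rw [PySem.List.insert_natCast ps _ _ hm,
      PySem.List.slice_to_natCast, PySem.List.slice_from_natCast]
    have htok : ps.take (ps.length / 2 + 1) ++ ["<br>"] ++ ps.drop (ps.length / 2 + 1)
        = ps.take (ps.length / 2 + 1) ++ "<br>" :: ps.drop (ps.length / 2 + 1) := by simp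
    rw [htok, A_eq_qrest, ← B_eq_qrest]
    rfl
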